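-- pv_equiv track=rewrite | github.com/stochastic-sisyphus/chipop-pred-apropos | src/data_collection/retail_data_collector.py | _map_census_category_to_retail_type
-- ===== SOURCE A (Python) =====
-- def _map_census_category_to_retail_type(category_code: str) -> str:
--     """Map Census category codes to retail types."""
--     category_mapping = {
--         '441': 'grocery_sales',      # Food and beverage stores
--         '448': 'clothing_sales',     # Clothing and accessories
--         '443': 'electronics_sales',  # Electronics and appliances
--         '442': 'furniture_sales',    # Furniture and home furnishings
--         '722': 'restaurant_sales',   # Food services and drinking places
--     }
--
--     for code, category in category_mapping.items():
--         if category_code.startswith(code):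
--             return category
--
--     return 'total_retail_sales'
-- ===== SOURCE B (Python) =====
-- def _map_census_category_to_retail_type(category_code: str) -> str:
--     """Map Census category codes to retail types via a character decision tree."""
--     if len(category_code) >= 3:
--         c0, c1, c2 = category_code[0], category_code[1], category_code[2]
--         if c0 == '4' and c1 == '4':
--             if c2 == '1':
--                 return 'grocery_sales'
--             if c2 == '2':
--                 return 'furniture_sales'
--             if c2 == '3':
--                 return 'electronics_sales'
--             if c2 == '8':
--                 return 'clothing_sales'
--         elif c0 == '7' and c1 == '2' and c2 == '2':
--             return 'restaurant_sales'
--     return 'total_retail_sales'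
-- ===== Notes on version B (the rewrite author's own statement) =====
-- stated objective: alternative
-- what changed: Replaces A's scan over a mapping table with startswith tests by a hard-coded character decision tree on the first three characters (shared '44' branch, then the third digit), with no table or string comparison at all.
import Mathlib
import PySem

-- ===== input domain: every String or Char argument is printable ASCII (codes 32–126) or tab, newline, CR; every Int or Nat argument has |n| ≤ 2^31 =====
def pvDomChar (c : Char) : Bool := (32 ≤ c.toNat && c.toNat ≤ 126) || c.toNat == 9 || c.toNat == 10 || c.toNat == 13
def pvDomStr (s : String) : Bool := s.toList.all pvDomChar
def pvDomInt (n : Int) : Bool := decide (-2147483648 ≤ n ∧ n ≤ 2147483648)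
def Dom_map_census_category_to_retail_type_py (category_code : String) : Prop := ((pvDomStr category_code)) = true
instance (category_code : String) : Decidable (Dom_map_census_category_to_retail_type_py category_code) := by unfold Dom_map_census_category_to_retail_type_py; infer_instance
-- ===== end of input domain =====

-- B replaces A's table scan with startswith tests by a hard-coded character
-- decision tree on the first three characters (alternative decomposition, no table).

-- ===== PORT A =====
-- the dict literal of A, as an insertion-ordered association list
def pvMapping : PySem.Dict String String :=
  PySem.Dict.ofList
    [("441", "grocery_sales"), ("448", "clothing_sales"), ("443", "electronics_sales"),
     ("442", "furniture_sales"), ("722", "restaurant_sales")]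

-- the 'for code, category in category_mapping.items(): if startswith: return' loop
def pvScanA : List (String × String) → String → String
  | [], _ => "total_retail_sales"
  | (code, category) :: rest, s =>
      if PySem.Str.startswith s code then category else pvScanA rest s

def map_census_category_to_retail_type_py (category_code : String) : String :=
  pvScanA pvMapping.items category_code

-- ===== PORT B =====
-- 'if len >= 3: c0,c1,c2 = ...' → match on the first three characters;
-- then the nested-if decision tree of Source B, branch for branch.
def map_census_category_to_retail_type_py_alt (category_code : String) : String :=
  match category_code.toList with
  | c0 :: c1 :: c2 :: _ =>
      if c0 = '4' ∧ c1 = '4' then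
        if c2 = '1' then "grocery_sales"
        else if c2 = '2' then "furniture_sales"
        else if c2 = '3' then "electronics_sales"
        else if c2 = '8' then "clothing_sales"
        else "total_retail_sales"
      else if c0 = '7' ∧ c1 = '2' ∧ c2 = '2' then "restaurant_sales"
      else "total_retail_sales"
  | _ => "total_retail_sales"

-- ===== PRECONDITION & SPEC =====
def Spec_map_census_category_to_retail_type_py (category_code : String) (out : String) : Prop := out = map_census_category_to_retail_type_py_alt category_code
instance (category_code : String) (out : String) : Decidable (Spec_map_census_category_to_retail_type_py category_code out) := by unfold Spec_map_census_category_to_retail_type_py; infer_instance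

-- ===== CLAIM (what is proved, stated in full; the proofs are below) =====
def Claim_equal_map_census_category_to_retail_type_py : Prop := ∀ (category_code : String), Dom_map_census_category_to_retail_type_py category_code → Spec_map_census_category_to_retail_type_py category_code (map_census_category_to_retail_type_py category_code)

-- ===== LEMMAS AND PROOFS =====

-- startswith with a 3-character pattern on a list of length ≥ 3: first-three-character test
theorem pv_sw3_cons (c0 c1 c2 : Char) (t : List Char) (a b c : Char) :
    PySem.Chars.startswith (c0 :: c1 :: c2 :: t) [a, b, c] =
      (decide (c0 = a) && decide (c1 = b) && decide (c2 = c)) := by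
  rw [Bool.eq_iff_iff, PySem.Chars.startswith_iff]
  simp only [List.cons_prefix_cons, List.nil_prefix, and_true, Bool.and_eq_true,
    decide_eq_true_eq]
  constructor <;> intro h <;> simp_all

-- startswith with a 3-character pattern on a list of length < 3: always false
theorem pv_sw3_short (l : List Char) (hl : l.length < 3) (a b c : Char) :
    PySem.Chars.startswith l [a, b, c] = false := by
  rw [Bool.eq_false_iff, Ne, PySem.Chars.startswith_iff]
  intro h
  have := h.length_le
  simp at this
  omega

set_option maxHeartbeats 1000000 in
theorem map_spec_aux (s : String) :
    map_census_category_to_retail_type_py s = map_census_category_to_retail_type_py_alt s := by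
  unfold map_census_category_to_retail_type_py map_census_category_to_retail_type_py_alt
  rw [show pvMapping.items =
      [("441", "grocery_sales"), ("448", "clothing_sales"), ("443", "electronics_sales"),
       ("442", "furniture_sales"), ("722", "restaurant_sales")] from by decide]
  simp only [pvScanA, PySem.Str.startswith_eq,
    show ("441" : String).toList = ['4','4','1'] from rfl,
    show ("448" : String).toList = ['4','4','8'] from rfl,
    show ("443" : String).toList = ['4','4','3'] from rfl,
    show ("442" : String).toList = ['4','4','2'] from rfl,
    show ("722" : String).toList = ['7','2','2'] from rfl]
  rcases hl : s.toList with _ | ⟨c0, _ | ⟨c1, _ | ⟨c2, t⟩⟩⟩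
  · simp [pv_sw3_short [] (by simp)]
  · simp [pv_sw3_short [c0] (by simp)]
  · simp [pv_sw3_short [c0, c1] (by simp)]
  · simp only [pv_sw3_cons, Bool.and_eq_true, decide_eq_true_eq]
    split_ifs <;> first | rfl | (exfalso; tauto) | (exfalso; simp_all)

-- ===== VERDICT (by name: the statement is the Claim_ definition above) =====
theorem map_census_category_to_retail_type_py_spec : Claim_equal_map_census_category_to_retail_type_py := by
  intro s _
  unfold Spec_map_census_category_to_retail_type_py
  exact map_spec_aux s
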